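-- pv_equiv track=rewrite | github.com/voschezang/mash | src/util.py | infer_dependencies
-- ===== SOURCE A (Python) =====
-- from typing import Any, Callable, Dict, Iterable, List, Literal, Sequence, Tuple, TypeVar, Union
--
-- AdjacencyList = Dict[str, List[str]]
--
-- def infer_dependencies(known_deps: AdjacencyList, key: str):
--     if key not in known_deps:
--         return
--
--     # yield direct dependencies
--     if key in known_deps:
--         yield from known_deps[key]
--
--     # yield indirect dependencies
--         for other_key in known_deps[key]:
--             direct_dependencies = infer_dependencies(known_deps, other_key)
--             yield from direct_dependencies
-- ===== SOURCE B (Python) =====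
-- def infer_dependencies(known_deps, key):
--     # Iterative DFS with an explicit stack instead of recursion + nested
--     # generator delegation; same yield order as the recursive version.
--     stack = [key]
--     while stack:
--         k = stack.pop()
--         ds = known_deps.get(k, ())
--         yield from ds
--         stack.extend(reversed(ds))
-- ===== Notes on version B (the rewrite author's own statement) =====
-- stated objective: alternative
-- what changed: A's recursion with nested generator delegation (each element is re-yielded through a chain of generators as deep as the dependency path) is replaced by a single iterative DFS over an explicit stack that yields each element once, in the same order.
import Mathlib
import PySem

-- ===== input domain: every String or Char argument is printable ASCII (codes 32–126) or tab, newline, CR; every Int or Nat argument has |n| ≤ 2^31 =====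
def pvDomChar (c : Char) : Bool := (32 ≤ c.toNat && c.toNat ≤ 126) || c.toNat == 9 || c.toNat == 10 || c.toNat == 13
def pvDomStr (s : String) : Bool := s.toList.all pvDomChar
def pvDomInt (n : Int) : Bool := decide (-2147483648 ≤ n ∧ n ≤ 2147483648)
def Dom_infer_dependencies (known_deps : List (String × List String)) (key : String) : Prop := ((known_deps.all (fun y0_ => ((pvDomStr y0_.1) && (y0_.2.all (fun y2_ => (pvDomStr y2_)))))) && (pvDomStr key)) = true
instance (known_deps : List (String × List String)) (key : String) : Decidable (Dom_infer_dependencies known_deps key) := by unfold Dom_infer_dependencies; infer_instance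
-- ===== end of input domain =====

-- B replaces A's recursion with nested generator delegation by an explicit-stack iterative
-- DFS yielding the same elements in the same order (objective: alternative). Both Pythons
-- are generators; the equivalence is about the yielded sequence, i.e. the value as a list.

-- ===== PORT A =====
-- A recurses with no termination guarantee (it raises RecursionError exactly when a
-- dependency cycle is reachable from `key`); the port carries a fuel of
-- known_deps.length + 1, which the proofs show is never exhausted under Pre_.
def inferA (d : List (String × List String)) : Nat → String → List String
  | 0, _ => []
  | fuel+1, k =>
    match (PySem.Dict.mk d).get? k with
    | none => []                                   -- `if key not in known_deps: return`
    | some ds => ds ++ ds.flatMap (fun a => inferA d fuel a)  -- yield direct deps, then recurse on each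

def infer_dependencies (known_deps : List (String × List String)) (key : String) : List String :=
  inferA known_deps (known_deps.length + 1) key

-- ===== PORT B =====
-- Python's stack top is the list end; here the stack is a List with top at the HEAD,
-- so `pop` takes the head and `extend(reversed(ds))` prepends ds (new top = ds[0]).
-- Like A's port, the loop carries a fuel, shown sufficient under Pre_.
def pvMaxLen (d : List (String × List String)) : Nat :=
  d.foldl (fun m p => max m p.2.length) 0

def inferBloop (d : List (String × List String)) : Nat → List String → List String → List String
  | 0, _, acc => acc
  | _+1, [], acc => acc                            -- `while stack:` exits
  | fuel+1, k :: rest, acc =>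
    let ds := ((PySem.Dict.mk d).get? k).getD []   -- ds = known_deps.get(k, ())
    inferBloop d fuel (ds ++ rest) (acc ++ ds)     -- yield from ds; stack.extend(reversed(ds))

def infer_dependencies_alt (known_deps : List (String × List String)) (key : String) : List String :=
  inferBloop known_deps ((pvMaxLen known_deps + 1) ^ known_deps.length) [key] []

-- ===== PRECONDITION & SPEC =====
-- pvLvl d i = the keys of d that start a dependency chain of i further key-to-key steps.
def pvLvl (d : List (String × List String)) : Nat → List String
  | 0 => d.map Prod.fst
  | i+1 => (d.filter (fun p => p.2.any (fun a => decide (a ∈ pvLvl d i)))).map Prod.fst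

-- Pre_ excludes exactly the inputs on which a dependency cycle is reachable from `key`
-- (equivalently, by pigeonhole: `key` starts a chain of more keys than d has entries);
-- there Python A's unbounded recursion raises RecursionError and Python B never terminates.
def Pre_infer_dependencies (known_deps : List (String × List String)) (key : String) : Prop :=
  key ∉ pvLvl known_deps known_deps.length
instance (known_deps : List (String × List String)) (key : String) : Decidable (Pre_infer_dependencies known_deps key) := by unfold Pre_infer_dependencies; infer_instance

def pvWitness_infer_dependencies : (List (String × List String)) × String :=
  ([("a", ["b", "c"]), ("b", ["c"]), ("c", [])], "a")

def Spec_infer_dependencies (known_deps : List (String × List String)) (key : String) (out : List String) : Prop := out = infer_dependencies_alt known_deps key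
instance (known_deps : List (String × List String)) (key : String) (out : List String) : Decidable (Spec_infer_dependencies known_deps key out) := by unfold Spec_infer_dependencies; infer_instance

-- ===== CLAIM (what is proved, stated in full; the proofs are below) =====
def Claim_equal_infer_dependencies : Prop := ∀ (known_deps : List (String × List String)) (key : String), Dom_infer_dependencies known_deps key → Pre_infer_dependencies known_deps key → Spec_infer_dependencies known_deps key (infer_dependencies known_deps key)

-- ===== LEMMAS AND PROOFS =====

-- If k is not a key of d, lookup fails.
lemma pv_get?_none (d : List (String × List String)) (k : String)
    (h : k ∉ d.map Prod.fst) : (PySem.Dict.mk d).get? k = none := by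
  rw [PySem.Dict.get?_eq_none_iff_not_mem_keys]; exact h

-- If k is not in pvLvl d (i+1) but lookup succeeds, none of its deps is in pvLvl d i.
lemma pv_deps_not_lvl (d : List (String × List String)) (i : Nat) (k : String)
    (ds : List String) (hget : (PySem.Dict.mk d).get? k = some ds)
    (h : k ∉ pvLvl d (i+1)) : ∀ a ∈ ds, a ∉ pvLvl d i := by
  intro a ha hlvl
  apply h
  have hmem : (k, ds) ∈ d := PySem.Dict.mem_items_of_get?_eq_some (PySem.Dict.mk d) hget
  simp only [pvLvl, List.mem_map, List.mem_filter]
  exact ⟨(k, ds), ⟨hmem, by simp only [List.any_eq_true, decide_eq_true_eq]; exact ⟨a, ha, hlvl⟩⟩, rfl⟩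

-- A's result is fuel-insensitive once the fuel reaches the chain depth of k.
lemma pv_A_stable (d : List (String × List String)) :
    ∀ i f₁ f₂ k, k ∉ pvLvl d i → i ≤ f₁ → i ≤ f₂ → inferA d f₁ k = inferA d f₂ k := by
  intro i
  induction i with
  | zero =>
    intro f₁ f₂ k hk _ _
    have hnone : (PySem.Dict.mk d).get? k = none := pv_get?_none d k hk
    cases f₁ <;> cases f₂ <;> simp [inferA, hnone]
  | succ i ih =>
    intro f₁ f₂ k hk h₁ h₂
    obtain ⟨g₁, rfl⟩ : ∃ g, f₁ = g + 1 := ⟨f₁ - 1, by omega⟩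
    obtain ⟨g₂, rfl⟩ : ∃ g, f₂ = g + 1 := ⟨f₂ - 1, by omega⟩
    simp only [inferA]
    cases hget : (PySem.Dict.mk d).get? k with
    | none => rfl
    | some ds =>
      have hds := pv_deps_not_lvl d i k ds hget hk
      show ds ++ List.flatMap (fun a => inferA d g₁ a) ds = ds ++ List.flatMap (fun a => inferA d g₂ a) ds
      congr 1
      apply List.flatMap_congr
      intro a ha
      exact ih g₁ g₂ a (hds a ha) (by omega) (by omega)

-- Seed for the max-fold: the accumulator never decreases.
lemma pv_foldl_max_mono (l : List (String × List String)) :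
    ∀ m : Nat, m ≤ l.foldl (fun m p => max m p.2.length) m := by
  induction l with
  | nil => intro m; simp
  | cons p l ih =>
    intro m
    simp only [List.foldl_cons]
    exact le_trans (le_max_left _ _) (ih _)

lemma pv_mem_le_foldl (l : List (String × List String)) :
    ∀ (m : Nat) (p : String × List String), p ∈ l →
      p.2.length ≤ l.foldl (fun m p => max m p.2.length) m := by
  induction l with
  | nil => intro m p hp; cases hp
  | cons q l ih =>
    intro m p hp
    rcases List.mem_cons.mp hp with rfl | hp
    · simp only [List.foldl_cons]
      exact le_trans (le_max_right m _) (pv_foldl_max_mono l _)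
    · simp only [List.foldl_cons]
      exact ih _ p hp

lemma pv_mem_le_maxLen (d : List (String × List String)) (p : String × List String)
    (hp : p ∈ d) : p.2.length ≤ pvMaxLen d :=
  pv_mem_le_foldl d 0 p hp

-- Length bound justifying B's fuel: |inferA d i k| + 1 ≤ (pvMaxLen d + 1)^i.
lemma pv_lenA (d : List (String × List String)) :
    ∀ i k, (inferA d i k).length + 1 ≤ (pvMaxLen d + 1) ^ i := by
  intro i
  induction i with
  | zero => intro k; simp [inferA]
  | succ i ih =>
    intro k
    simp only [inferA]
    cases hget : (PySem.Dict.mk d).get? k with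
    | none => simpa using Nat.one_le_pow (i+1) (pvMaxLen d + 1) (by omega)
    | some ds =>
      have hds : ds.length ≤ pvMaxLen d :=
        pv_mem_le_maxLen d (k, ds) (PySem.Dict.mem_items_of_get?_eq_some (PySem.Dict.mk d) hget)
      have hsum : ((ds.flatMap (fun a => inferA d i a)).length : Nat)
          ≤ ds.length * ((pvMaxLen d + 1) ^ i - 1) := by
        rw [List.length_flatMap]
        calc (ds.map fun a => (inferA d i a).length).sum
            ≤ (ds.map fun a => (inferA d i a).length).length * ((pvMaxLen d + 1) ^ i - 1) := by
              apply List.sum_le_card_nsmul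
              intro x hx
              simp only [List.mem_map] at hx
              obtain ⟨a, _, rfl⟩ := hx
              have := ih a; omega
          _ = ds.length * ((pvMaxLen d + 1) ^ i - 1) := by simp
      have hpow : 1 ≤ (pvMaxLen d + 1) ^ i := Nat.one_le_pow _ _ (by omega)
      have hM : ds.length * ((pvMaxLen d + 1) ^ i - 1) ≤ pvMaxLen d * ((pvMaxLen d + 1) ^ i - 1) :=
        Nat.mul_le_mul_right _ hds
      simp only [List.length_append]
      have : (pvMaxLen d + 1) ^ (i+1) = pvMaxLen d * (pvMaxLen d + 1) ^ i + (pvMaxLen d + 1) ^ i := by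
        ring
      have h2 : pvMaxLen d * ((pvMaxLen d + 1) ^ i - 1) + pvMaxLen d = pvMaxLen d * (pvMaxLen d + 1) ^ i := by
        rw [Nat.mul_sub, Nat.mul_one, Nat.sub_add_cancel (Nat.le_mul_of_pos_right _ hpow)]
      omega

lemma pv_loop_nil (d : List (String × List String)) (f : Nat) (acc : List String) :
    inferBloop d f [] acc = acc := by
  cases f <;> rfl

-- B's loop spends exactly |inferA d i k| + 1 fuel to process k, appending inferA d i k.
lemma pv_B_consume (d : List (String × List String)) :
    ∀ i k, k ∉ pvLvl d i → ∀ f rest acc,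
      inferBloop d (f + ((inferA d i k).length + 1)) (k :: rest) acc
        = inferBloop d f rest (acc ++ inferA d i k) := by
  intro i
  induction i with
  | zero =>
    intro k hk f rest acc
    have hnone : (PySem.Dict.mk d).get? k = none := pv_get?_none d k hk
    simp [inferA, inferBloop, hnone]
  | succ i ih =>
    intro k hk f rest acc
    cases hget : (PySem.Dict.mk d).get? k with
    | none =>
      simp [inferA, inferBloop, hget]
    | some ds =>
      have hds : ∀ a ∈ ds, a ∉ pvLvl d i := pv_deps_not_lvl d i k ds hget hk
      have inner : ∀ (l : List String), (∀ a ∈ l, a ∉ pvLvl d i) → ∀ f rest acc,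
          inferBloop d (f + ((l.flatMap (fun a => inferA d i a)).length + l.length)) (l ++ rest) acc
            = inferBloop d f rest (acc ++ l.flatMap (fun a => inferA d i a)) := by
        intro l
        induction l with
        | nil => intro _ f rest acc; simp
        | cons a l ihl =>
          intro hl f rest acc
          have ha := hl a (List.mem_cons_self)
          have hl' := fun b hb => hl b (List.mem_cons_of_mem a hb)
          rw [List.cons_append]
          rw [show f + (((a :: l).flatMap (fun a => inferA d i a)).length + (a :: l).length)
              = (f + ((l.flatMap (fun a => inferA d i a)).length + l.length))
                + ((inferA d i a).length + 1) from by
            simp [List.flatMap_cons]; omega]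
          rw [ih a ha _ (l ++ rest) acc]
          rw [ihl hl' f rest (acc ++ inferA d i a)]
          simp [List.flatMap_cons, List.append_assoc]
      have eA : inferA d (i+1) k = ds ++ ds.flatMap (fun a => inferA d i a) := by
        simp [inferA, hget]
      rw [eA]
      have efuel2 : f + ((ds ++ ds.flatMap (fun a => inferA d i a)).length + 1)
          = (f + ((ds.flatMap (fun a => inferA d i a)).length + ds.length)) + 1 := by
        simp [List.length_append]; omega
      rw [efuel2]
      rw [show ∀ F, inferBloop d (F + 1) (k :: rest) acc
            = inferBloop d F ((((PySem.Dict.mk d).get? k).getD []) ++ rest) (acc ++ (((PySem.Dict.mk d).get? k).getD [])) from fun F => rfl]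
      rw [hget]
      simp only [Option.getD_some]
      rw [inner ds hds f rest (acc ++ ds)]
      simp [List.append_assoc]

-- ===== VERDICT (by name: the statement is the Claim_ definition above) =====
theorem infer_dependencies_spec : Claim_equal_infer_dependencies := by
  intro d key _hdom pre
  unfold Spec_infer_dependencies infer_dependencies infer_dependencies_alt
  have e1 := pv_A_stable d d.length (d.length + 1) d.length key pre (by omega) (le_refl _)
  have hlen := pv_lenA d d.length key
  obtain ⟨f, hf⟩ : ∃ f, (pvMaxLen d + 1) ^ d.length = f + ((inferA d d.length key).length + 1) :=
    ⟨(pvMaxLen d + 1) ^ d.length - ((inferA d d.length key).length + 1), by omega⟩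
  rw [e1, hf, pv_B_consume d d.length key pre f [] [], pv_loop_nil]
  simp
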